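-- pv_equiv track=rewrite | github.com/dudecon/python | Ancestor_Compiler_WikiPedia.py | DepthOfPedigree
-- ===== SOURCE A (Python) =====
-- def DepthOfPedigree(u, Ped, d=0):
--     """Return deepest known ancestor name and its generation depth."""
--     totaldepth = d
--     deepu = u
--     if u == 'unknown': return 'u', 0
--     if len(u) < 2: return 'n', 0
--     if u not in Ped: return deepu, totaldepth
--     p = Ped[u]
--     for nmk in ('m', 'f'):
--         if nmk in p:
--             otheru, otherdepth = DepthOfPedigree(p[nmk], Ped, d + 1)
--             if otherdepth > totaldepth:
--                 deepu = otheru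
--                 totaldepth = otherdepth
--     return deepu, totaldepth
-- ===== SOURCE B (Python) =====
-- def DepthOfPedigree(u, Ped, d=0):
--     """Bottom-up dynamic programming over generation levels: one table row per
--     level, from the deepest possible level down to 0 — no recursion, so shared
--     ancestors in a DAG are evaluated once per level instead of once per path."""
--     if u == 'unknown':
--         return 'u', 0
--     if len(u) < 2:
--         return 'n', 0
--     if u not in Ped:
--         return u, d
--     n = len(Ped)
--     # level n: no further recursion is possible (a longer chain would repeat a key)
--     row = {v: (v, d + n) for v in Ped}
--     for l in range(n - 1, -1, -1):
--         new = {}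
--         for v, p in Ped.items():
--             best = (v, d + l)
--             for nmk in ('m', 'f'):
--                 if nmk in p:
--                     c = p[nmk]
--                     if c == 'unknown':
--                         o = ('u', 0)
--                     elif len(c) < 2:
--                         o = ('n', 0)
--                     elif c in row:
--                         o = row[c]
--                     else:
--                         o = (c, d + l + 1)
--                     if o[1] > best[1]:
--                         best = o
--             new[v] = best
--         row = new
--     return row[u]
-- ===== Notes on version B (the rewrite author's own statement) =====
-- stated objective: alternative
-- what changed: A's top-down recursion (which re-explores a shared ancestor once per path, exponential on DAGs) is replaced by a bottom-up dynamic-programming table: one row of best-ancestor values per generation level, computed from the deepest possible level (len(Ped)) down to 0, with no recursion.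
import Mathlib
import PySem

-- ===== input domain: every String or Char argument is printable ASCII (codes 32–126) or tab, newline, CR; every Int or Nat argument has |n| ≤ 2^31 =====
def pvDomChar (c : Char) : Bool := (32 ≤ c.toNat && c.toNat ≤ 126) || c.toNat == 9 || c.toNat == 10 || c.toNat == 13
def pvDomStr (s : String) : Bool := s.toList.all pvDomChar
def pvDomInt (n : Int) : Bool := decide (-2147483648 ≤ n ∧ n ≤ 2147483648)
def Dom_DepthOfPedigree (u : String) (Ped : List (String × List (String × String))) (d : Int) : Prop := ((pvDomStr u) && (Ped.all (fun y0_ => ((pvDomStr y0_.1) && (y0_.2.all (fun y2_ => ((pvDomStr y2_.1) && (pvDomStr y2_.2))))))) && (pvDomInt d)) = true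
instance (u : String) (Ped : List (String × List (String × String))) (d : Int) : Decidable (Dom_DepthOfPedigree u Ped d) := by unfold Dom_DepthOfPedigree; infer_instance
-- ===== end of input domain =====

-- B replaces A's exponential recursion over ancestor paths by a bottom-up DP table per
-- generation level (objective: alternative — polynomial worst case on shared-ancestor DAGs).

-- ===== PORT A =====
-- A's recursion, with fuel: Ped.length + 1 levels always suffice when no cycle is
-- reachable from u (a longer chain of keys would repeat one), which Pre_ guarantees.
def pvGoA (Ped : List (String × List (String × String))) : Nat → String → Int → String × Int
  | 0, u, d => (u, d)
  | fuel+1, u, d =>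
    if u = "unknown" then ("u", 0)
    else if PySem.Str.len u < 2 then ("n", 0)
    else
      match (PySem.Dict.mk Ped).get? u with
      | none => (u, d)
      | some p =>
        ["m", "f"].foldl (fun acc nmk =>
          match (PySem.Dict.mk p).get? nmk with
          | none => acc
          | some c =>
            let r := pvGoA Ped fuel c (d + 1)
            if r.2 > acc.2 then r else acc) (u, d)

def DepthOfPedigree (u : String) (Ped : List (String × List (String × String))) (d : Int) : String × Int :=
  pvGoA Ped (Ped.length + 1) u d

-- ===== PORT B =====
-- value contributed by child c seen at level l, given the table `row` for level l+1
def pvChildVal (row : PySem.Dict String (String × Int)) (d l : Int) (c : String) : String × Int :=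
  if c = "unknown" then ("u", 0)
  else if PySem.Str.len c < 2 then ("n", 0)
  else
    match row.get? c with
    | some rc => rc
    | none => (c, d + l + 1)

def pvEntry (row : PySem.Dict String (String × Int)) (d l : Int) (v : String) (p : List (String × String)) : String × Int :=
  ["m", "f"].foldl (fun best nmk =>
    match (PySem.Dict.mk p).get? nmk with
    | none => best
    | some c =>
      let o := pvChildVal row d l c
      if o.2 > best.2 then o else best) (v, d + l)

-- one pass of the level loop: build the table for level l from the one for level l+1
def pvStep (Ped : List (String × List (String × String))) (row : PySem.Dict String (String × Int)) (d l : Int) : PySem.Dict String (String × Int) :=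
  Ped.foldl (fun new vp => new.insert vp.1 (pvEntry row d l vp.1 vp.2)) (PySem.Dict.mk [])

-- table after k iterations of the level loop (so it describes level n - k)
def pvRows (Ped : List (String × List (String × String))) (d : Int) (n : Nat) : Nat → PySem.Dict String (String × Int)
  | 0 => Ped.foldl (fun r vp => r.insert vp.1 (vp.1, d + (n : Int))) (PySem.Dict.mk [])
  | k+1 => pvStep Ped (pvRows Ped d n k) d ((n : Int) - ((k : Int) + 1))

def DepthOfPedigree_alt (u : String) (Ped : List (String × List (String × String))) (d : Int) : String × Int :=
  if u = "unknown" then ("u", 0)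
  else if PySem.Str.len u < 2 then ("n", 0)
  else
    match (PySem.Dict.mk Ped).get? u with
    | none => (u, d)
    | some _ =>
      match (pvRows Ped d Ped.length Ped.length).get? u with
      | some r => r
      | none => (u, d)   -- unreachable: the table is keyed by exactly Ped's keys

-- ===== PRECONDITION & SPEC =====
-- the ancestors A recurses into from node v
def pvNexts (Ped : List (String × List (String × String))) (v : String) : List String :=
  if v = "unknown" then []
  else if PySem.Str.len v < 2 then []
  else
    match (PySem.Dict.mk Ped).get? v with
    | none => []
    | some p =>
      (match (PySem.Dict.mk p).get? "m" with | none => [] | some c => [c]) ++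
      (match (PySem.Dict.mk p).get? "f" with | none => [] | some c => [c])

-- frontier after k parent steps
def pvIter (Ped : List (String × List (String × String))) : Nat → List String → List String
  | 0, L => L
  | k+1, L => pvIter Ped k (L.flatMap (pvNexts Ped))

-- Pre_ excludes (a) pedigrees with an ancestor cycle reachable from u, on which the Python A
-- recurses forever (RecursionError), and (b) duplicate keys in Ped, which the Python dict this
-- list represents cannot hold — so no input of the Python program is excluded besides cycles.
def Pre_DepthOfPedigree (u : String) (Ped : List (String × List (String × String))) (_d : Int) : Prop :=
  pvIter Ped (Ped.length + 1) [u] = [] ∧ (Ped.map Prod.fst).Nodup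

instance (u : String) (Ped : List (String × List (String × String))) (d : Int) : Decidable (Pre_DepthOfPedigree u Ped d) := by unfold Pre_DepthOfPedigree; infer_instance

def pvWitness_DepthOfPedigree : String × (List (String × List (String × String))) × Int :=
  ("ab", [("ab", [("m", "cd"), ("f", "unknown")]), ("ef", [("m", "ab")])], 0)

def Spec_DepthOfPedigree (u : String) (Ped : List (String × List (String × String))) (d : Int) (out : String × Int) : Prop := out = DepthOfPedigree_alt u Ped d
instance (u : String) (Ped : List (String × List (String × String))) (d : Int) (out : String × Int) : Decidable (Spec_DepthOfPedigree u Ped d out) := by unfold Spec_DepthOfPedigree; infer_instance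

-- ===== CLAIM (what is proved, stated in full; the proofs are below) =====
def Claim_equal_DepthOfPedigree : Prop := ∀ (u : String) (Ped : List (String × List (String × String))) (d : Int), Dom_DepthOfPedigree u Ped d → Pre_DepthOfPedigree u Ped d → Spec_DepthOfPedigree u Ped d (DepthOfPedigree u Ped d)

-- ===== LEMMAS AND PROOFS =====

theorem pvIter_append (Ped : List (String × List (String × String))) :
    ∀ (k : Nat) (L1 L2 : List String),
      pvIter Ped k (L1 ++ L2) = pvIter Ped k L1 ++ pvIter Ped k L2 := by
  intro k
  induction k with
  | zero => intro L1 L2; rfl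
  | succ k ih =>
    intro L1 L2
    simp only [pvIter, List.flatMap_append]
    exact ih _ _

theorem pvIter_eq_nil_of_mem (Ped : List (String × List (String × String)))
    {k : Nat} {L : List String} (h : pvIter Ped k L = []) {c : String} (hc : c ∈ L) :
    pvIter Ped k [c] = [] := by
  obtain ⟨l1, l2, rfl⟩ := List.append_of_mem hc
  rw [pvIter_append] at h
  have h2 := List.append_eq_nil_iff.mp h |>.2
  rw [show c :: l2 = [c] ++ l2 from rfl, pvIter_append] at h2
  exact (List.append_eq_nil_iff.mp h2).1

theorem pvget?_mk_none_iff {α : Type} (L : List (String × α)) (v : String) :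
    (PySem.Dict.mk L).get? v = none ↔ v ∉ L.map Prod.fst := by
  induction L with
  | nil => simp [PySem.Dict.get?]
  | cons hd tl ih =>
    rw [show PySem.Dict.mk (hd :: tl) = PySem.Dict.mk ((hd.1, hd.2) :: tl) from rfl,
      PySem.Dict.get?_mk_cons]
    by_cases h : hd.1 = v
    · simp [h]
    · have hb : (hd.1 == v) = false := by simp [h]
      rw [hb]
      simp only [Bool.false_eq_true, if_false, ih, List.map_cons, List.mem_cons]
      constructor
      · intro hv hor; rcases hor with h' | h' ; exact h h'.symm ; exact hv h'
      · intro hv h'; exact hv (Or.inr h')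

-- the generic lookup of a dict built by inserting f v p for each pair (v, p) of Ped
theorem pvget?_foldl_insert {α : Type} (f : String → List (String × String) → α) :
    ∀ (L : List (String × List (String × String))),
      (L.map Prod.fst).Nodup →
      ∀ (init : PySem.Dict String α) (v : String),
        (L.foldl (fun acc vp => acc.insert vp.1 (f vp.1 vp.2)) init).get? v
          = match (PySem.Dict.mk L).get? v with
            | some p => some (f v p)
            | none => init.get? v := by
  intro L
  induction L with
  | nil => intro _ init v; rfl
  | cons hd tl ih =>
    intro hnd init v
    simp only [List.map_cons, List.nodup_cons] at hnd
    rw [List.foldl_cons, ih hnd.2,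
      show PySem.Dict.mk (hd :: tl) = PySem.Dict.mk ((hd.1, hd.2) :: tl) from rfl,
      PySem.Dict.get?_mk_cons]
    by_cases hv : hd.1 = v
    · subst hv
      have htl : (PySem.Dict.mk tl).get? hd.1 = none :=
        (pvget?_mk_none_iff tl hd.1).mpr hnd.1
      simp [htl, PySem.Dict.get?_insert_self]
    · have : (hd.1 == v) = false := by simp [hv]
      simp only [this, Bool.false_eq_true, if_false]
      cases hmk : (PySem.Dict.mk tl).get? v with
      | some p => simp
      | none => simp [PySem.Dict.get?_insert_of_ne _ _ (Ne.symm hv)]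

-- lookups in the two shapes of pvRows
theorem pvRows_zero_get? (Ped : List (String × List (String × String))) (d : Int) (n : Nat)
    (hnd : (Ped.map Prod.fst).Nodup) (v : String) :
    (pvRows Ped d n 0).get? v
      = match (PySem.Dict.mk Ped).get? v with
        | some _ => some (v, d + (n : Int))
        | none => none := by
  have h := pvget?_foldl_insert (fun w (_ : List (String × String)) => (w, d + (n : Int)))
    Ped hnd (PySem.Dict.mk []) v
  exact h.trans (by cases (PySem.Dict.mk Ped).get? v <;> rfl)

theorem pvRows_succ_get? (Ped : List (String × List (String × String))) (d : Int) (n k : Nat)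
    (hnd : (Ped.map Prod.fst).Nodup) (v : String) :
    (pvRows Ped d n (k+1)).get? v
      = match (PySem.Dict.mk Ped).get? v with
        | some p => some (pvEntry (pvRows Ped d n k) d ((n : Int) - ((k : Int) + 1)) v p)
        | none => none := by
  rw [show pvRows Ped d n (k+1)
      = Ped.foldl (fun acc vp => acc.insert vp.1 (pvEntry (pvRows Ped d n k) d ((n : Int) - ((k : Int) + 1)) vp.1 vp.2)) (PySem.Dict.mk []) from rfl,
    pvget?_foldl_insert _ Ped hnd]
  cases (PySem.Dict.mk Ped).get? v <;> rfl

-- a row's key set is Ped's key set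
theorem pvRows_get?_none_iff (Ped : List (String × List (String × String))) (d : Int) (n k : Nat)
    (hnd : (Ped.map Prod.fst).Nodup) (v : String) :
    (pvRows Ped d n k).get? v = none ↔ (PySem.Dict.mk Ped).get? v = none := by
  cases k with
  | zero => rw [pvRows_zero_get? Ped d n hnd v]; cases (PySem.Dict.mk Ped).get? v <;> simp
  | succ k => rw [pvRows_succ_get? Ped d n k hnd v]; cases (PySem.Dict.mk Ped).get? v <;> simp

-- children of a valid in-Ped node are in pvNexts
theorem pvMem_nexts (Ped : List (String × List (String × String))) {v : String}
    {p : List (String × String)} (h1 : ¬ v = "unknown") (h2 : ¬ PySem.Str.len v < 2)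
    (hp : (PySem.Dict.mk Ped).get? v = some p) {nmk c : String}
    (hnmk : nmk = "m" ∨ nmk = "f") (hc : (PySem.Dict.mk p).get? nmk = some c) :
    c ∈ pvNexts Ped v := by
  unfold pvNexts
  rw [if_neg h1, if_neg h2, hp]
  show c ∈ (match (PySem.Dict.mk p).get? "m" with | none => [] | some c => [c]) ++
      (match (PySem.Dict.mk p).get? "f" with | none => [] | some c => [c])
  rcases hnmk with h | h <;> subst h <;> rw [hc] <;> simp

-- the child value B reads off the previous row equals A's recursive call
theorem pvChildVal_correct (Ped : List (String × List (String × String))) (d : Int) (n : Nat)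
    (hnd : (Ped.map Prod.fst).Nodup) (k : Nat)
    (ih : ∀ (v : String) (p : List (String × String)),
      ¬ v = "unknown" → ¬ PySem.Str.len v < 2 →
      (PySem.Dict.mk Ped).get? v = some p →
      pvIter Ped (k+1) [v] = [] →
      (pvRows Ped d n k).get? v = some (pvGoA Ped (k+1) v (d + ((n : Int) - (k : Int)))))
    (c : String) (hiter : pvIter Ped (k+1) [c] = []) :
    pvChildVal (pvRows Ped d n k) d ((n : Int) - ((k : Int) + 1)) c
      = pvGoA Ped (k+1) c (d + ((n : Int) - ((k : Int) + 1)) + 1) := by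
  unfold pvChildVal
  by_cases h1 : c = "unknown"
  · simp [h1, pvGoA]
  by_cases h2 : PySem.Str.len c < 2
  · have h2' : c.length ≤ 1 := by simpa using h2
    simp [h1, h2', pvGoA]
  have h2' : ¬ c.length ≤ 1 := by simpa using h2
  rw [if_neg h1, if_neg h2]
  cases hrc : (pvRows Ped d n k).get? c with
  | none =>
    have hped : (PySem.Dict.mk Ped).get? c = none :=
      (pvRows_get?_none_iff Ped d n k hnd c).mp hrc
    simp [pvGoA, h1, h2', hped]
  | some rc =>
    cases hped : (PySem.Dict.mk Ped).get? c with
    | none =>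
      rw [(pvRows_get?_none_iff Ped d n k hnd c).mpr hped] at hrc
      exact absurd hrc (by simp)
    | some p =>
      have := ih c p h1 h2 hped hiter
      rw [this] at hrc
      have harg : d + ((n : Int) - ((k : Int) + 1)) + 1 = d + ((n : Int) - (k : Int)) := by ring
      rw [harg]
      injection hrc with h
      simpa using h.symm

-- main invariant: entry of row k at a valid in-Ped node v is A's value at level n - k
theorem pvRows_correct (Ped : List (String × List (String × String))) (d : Int)
    (hnd : (Ped.map Prod.fst).Nodup) :
    ∀ (k : Nat) (v : String) (p : List (String × String)),
      ¬ v = "unknown" → ¬ PySem.Str.len v < 2 →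
      (PySem.Dict.mk Ped).get? v = some p →
      pvIter Ped (k+1) [v] = [] →
      (pvRows Ped d Ped.length k).get? v
        = some (pvGoA Ped (k+1) v (d + ((Ped.length : Int) - (k : Int)))) := by
  intro k
  induction k with
  | zero =>
    intro v p h1 h2 hp hiter
    -- the frontier from v is already empty after one step: v has no recorded parents
    have hnx : pvNexts Ped v = [] := by
      have : pvIter Ped 0 ([v].flatMap (pvNexts Ped)) = [] := hiter
      simpa [pvIter] using this
    have hm : (PySem.Dict.mk p).get? "m" = none := by
      unfold pvNexts at hnx
      rw [if_neg h1, if_neg h2, hp] at hnx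
      cases hm' : (PySem.Dict.mk p).get? "m" <;> cases hf' : (PySem.Dict.mk p).get? "f" <;>
        simp_all
    have hf : (PySem.Dict.mk p).get? "f" = none := by
      unfold pvNexts at hnx
      rw [if_neg h1, if_neg h2, hp] at hnx
      cases hm' : (PySem.Dict.mk p).get? "m" <;> cases hf' : (PySem.Dict.mk p).get? "f" <;>
        simp_all
    have h2' : ¬ v.length ≤ 1 := by simpa using h2
    rw [pvRows_zero_get? Ped d Ped.length hnd v, hp]
    simp [pvGoA, h1, h2', hp, hm, hf]
  | succ k ih =>
    intro v p h1 h2 hp hiter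
    have hnext : ∀ c, c ∈ pvNexts Ped v → pvIter Ped (k+1) [c] = [] := by
      intro c hc
      have : pvIter Ped (k+1) ([v].flatMap (pvNexts Ped)) = [] := hiter
      exact pvIter_eq_nil_of_mem Ped (by simpa [pvIter] using hiter) (by simpa using hc)
    rw [pvRows_succ_get? Ped d Ped.length k hnd v, hp,
      show ((Ped.length : Int) - ((k+1 : Nat) : Int)) = ((Ped.length : Int) - ((k : Int) + 1)) from by push_cast; ring]
    -- unfold A one step
    have hA : pvGoA Ped (k+1+1) v (d + ((Ped.length : Int) - ((k : Int) + 1)))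
        = ["m", "f"].foldl (fun acc nmk =>
            match (PySem.Dict.mk p).get? nmk with
            | none => acc
            | some c =>
              let r := pvGoA Ped (k+1) c (d + ((Ped.length : Int) - ((k : Int) + 1)) + 1)
              if r.2 > acc.2 then r else acc) (v, d + ((Ped.length : Int) - ((k : Int) + 1))) := by
      conv_lhs => rw [pvGoA]
      rw [if_neg h1, if_neg h2, hp]
    rw [hA]
    unfold pvEntry
    cases hm : (PySem.Dict.mk p).get? "m" with
    | none =>
      cases hf : (PySem.Dict.mk p).get? "f" with
      | none => simp only [List.foldl, hm, hf]
      | some cf =>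
        have ef := pvChildVal_correct Ped d Ped.length hnd k ih cf
          (hnext cf (pvMem_nexts Ped h1 h2 hp (Or.inr rfl) hf))
        simp only [List.foldl, hm, hf, ef]
    | some cm =>
      have em := pvChildVal_correct Ped d Ped.length hnd k ih cm
        (hnext cm (pvMem_nexts Ped h1 h2 hp (Or.inl rfl) hm))
      cases hf : (PySem.Dict.mk p).get? "f" with
      | none => simp only [List.foldl, hm, hf, em]
      | some cf =>
        have ef := pvChildVal_correct Ped d Ped.length hnd k ih cf
          (hnext cf (pvMem_nexts Ped h1 h2 hp (Or.inr rfl) hf))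
        simp only [List.foldl, hm, hf, em, ef]

-- ===== VERDICT (by name: the statement is the Claim_ definition above) =====
theorem DepthOfPedigree_spec : Claim_equal_DepthOfPedigree := by
  intro u Ped d _hdom hpre
  obtain ⟨hiter, hnd⟩ := hpre
  unfold Spec_DepthOfPedigree DepthOfPedigree DepthOfPedigree_alt
  by_cases h1 : u = "unknown"
  · simp [pvGoA, h1]
  by_cases h2 : PySem.Str.len u < 2
  · have h2' : u.length ≤ 1 := by simpa using h2
    simp [pvGoA, h1, h2']
  have h2' : ¬ u.length ≤ 1 := by simpa using h2
  cases hp : (PySem.Dict.mk Ped).get? u with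
  | none => simp [pvGoA, h1, h2', hp]
  | some p =>
    have hrow := pvRows_correct Ped d hnd Ped.length u p h1 h2 hp hiter
    have harg : d + ((Ped.length : Int) - (Ped.length : Int)) = d := by ring
    rw [harg] at hrow
    simp [h1, h2', hrow]
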